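-- pv_equiv track=rewrite | github.com/Nahom-Derese/Competitive-Programing | Contests/A2SV/Contest VIII/A_Flag_Checker.py | check
-- ===== SOURCE A (Python) =====
-- def check(flag):
--     prev = -1
--     for i in flag:
--         if len(i) > 1:
--             return False
--         elif prev == i:
--             return False
--         prev = i
--     return True
-- ===== SOURCE B (Python) =====
-- def check(flag):
--     runs = [c for i, c in enumerate(flag) if i == 0 or c != flag[i - 1]]
--     return len(runs) == len(flag) and set(map(len, flag)) <= {0, 1}
-- ===== Notes on version B (the rewrite author's own statement) =====
-- stated objective: alternative
-- what changed: Instead of A's stateful scan carrying prev with early returns, B run-length-compresses the list (keeping each element whose predecessor differs) and tests that nothing was compressed away (len(runs) == len(flag)), and checks the single-character condition globally as a set inclusion set(map(len, flag)) <= {0, 1}.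
import Mathlib
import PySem

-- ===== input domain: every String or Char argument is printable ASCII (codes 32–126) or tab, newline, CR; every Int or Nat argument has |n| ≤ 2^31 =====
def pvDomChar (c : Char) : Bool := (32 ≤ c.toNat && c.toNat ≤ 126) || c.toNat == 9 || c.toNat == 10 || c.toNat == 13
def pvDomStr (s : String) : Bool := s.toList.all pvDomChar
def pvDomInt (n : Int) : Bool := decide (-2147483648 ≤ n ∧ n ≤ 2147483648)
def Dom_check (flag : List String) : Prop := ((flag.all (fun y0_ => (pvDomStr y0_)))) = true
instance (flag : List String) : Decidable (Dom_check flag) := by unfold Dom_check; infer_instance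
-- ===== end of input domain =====

-- B (alternative, same cost): run-length-compress the list and test nothing was removed,
-- plus a set-inclusion check that every element's length is 0 or 1 — instead of A's stateful prev-scan.
-- ===== PORT A =====
-- Python's prev starts as -1 (an int), which compares unequal to every string; ported as Option String with none ≠ some _.
def checkLoop (prev : Option String) (flag : List String) : Bool :=
  match flag with
  | [] => true
  | i :: rest =>
    if PySem.Str.len i > 1 then false
    else if prev == some i then false
    else checkLoop (some i) rest

def check (flag : List String) : Bool := checkLoop none flag

-- ===== PORT B =====
-- runs = [c for i, c in enumerate(flag) if i == 0 or c != flag[i - 1]]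
-- return len(runs) == len(flag) and set(map(len, flag)) <= {0, 1}
def check_alt (flag : List String) : Bool :=
  let runs := (PySem.List.enumerate flag).filter
      (fun p => p.1 == 0 || !(PySem.List.pyGet? flag (p.1 - 1) == some p.2))
  (runs.length == flag.length) &&
  PySem.Set.issubset (PySem.Set.ofList (flag.map PySem.Str.len)) [0, 1]

-- ===== PRECONDITION & SPEC =====
def Spec_check (flag : List String) (out : Bool) : Prop := out = check_alt flag
instance (flag : List String) (out : Bool) : Decidable (Spec_check flag out) := by unfold Spec_check; infer_instance

-- ===== CLAIM (what is proved, stated in full; the proofs are below) =====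
def Claim_equal_check : Prop := ∀ (flag : List String), Dom_check flag → Spec_check flag (check flag)

-- ===== LEMMAS AND PROOFS =====
-- Common normal form both sides are reduced to.
def adjOK (flag : List String) : Bool :=
  (flag.zip (flag.drop 1)).all (fun p => !(p.1 == p.2))
def lenOK (flag : List String) : Bool :=
  flag.all (fun c => PySem.Str.len c ≤ 1)

lemma checkLoop_eq (flag : List String) : ∀ (prev : Option String),
    checkLoop prev flag =
      (lenOK flag && adjOK flag &&
       (match flag, prev with
        | i :: _, some p => !(p == i)
        | _, _ => true)) := by
  induction flag with
  | nil => intro prev; rfl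
  | cons i rest ih =>
    intro prev
    simp only [checkLoop, lenOK, adjOK]
    by_cases h1 : PySem.Str.len i > 1
    · have hd : decide (PySem.Str.len i ≤ 1) = false := decide_eq_false (by omega)
      simp only [if_pos h1, List.all_cons, hd, Bool.false_and]
    · have h1' : PySem.Str.len i ≤ 1 := by omega
      have hd : decide (PySem.Str.len i ≤ 1) = true := decide_eq_true h1'
      rw [if_neg h1]
      by_cases h2 : prev == some i
      · rw [if_pos h2]
        cases prev with
        | none => simp at h2
        | some p =>
          have hp : p = i := by simpa using h2
          subst hp
          cases rest <;> simp
      · rw [if_neg h2]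
        rw [ih (some i)]
        simp only [lenOK, adjOK]
        cases prev with
        | none =>
          cases rest with
          | nil => simp only [List.all_cons, List.all_nil, hd]; simp
          | cons j r =>
            simp only [List.all_cons, List.zip_cons_cons, List.drop_succ_cons,
              List.drop_zero, hd, Bool.true_and, Bool.and_true]
            ac_rfl
        | some p =>
          have hpi : ¬ (p = i) := by simpa using h2
          have hb2 : (!(p == i)) = true := by simpa using hpi
          cases rest with
          | nil => simp only [List.all_cons, List.all_nil, hd, hb2]; simp
          | cons j r =>
            simp only [List.all_cons, List.zip_cons_cons, List.drop_succ_cons,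
              List.drop_zero, hd, hb2, Bool.true_and, Bool.and_true]
            ac_rfl

lemma check_norm (flag : List String) : check flag = (lenOK flag && adjOK flag) := by
  rw [check, checkLoop_eq]
  cases flag <;> simp

-- B's set-inclusion check equals the per-element length bound.
lemma subset_norm (flag : List String) :
    PySem.Set.issubset (PySem.Set.ofList (flag.map PySem.Str.len)) [0, 1] = lenOK flag := by
  rw [Bool.eq_iff_iff, PySem.Set.issubset_iff]
  simp only [lenOK, List.all_eq_true, decide_eq_true_eq, PySem.Set.mem_ofList, List.mem_map]
  constructor
  · intro h c hc
    have := h (PySem.Str.len c) ⟨c, hc, rfl⟩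
    simp only [List.mem_cons, List.not_mem_nil, or_false] at this
    rcases this with h0 | h1 <;> omega
  · rintro h x ⟨c, hc, rfl⟩
    have h1 := h c hc
    have h0 : (0:Int) ≤ PySem.Str.len c := by
      rw [PySem.Str.len_eq]; positivity
    have : PySem.Str.len c = 0 ∨ PySem.Str.len c = 1 := by omega
    simpa using this

-- B's run-compression keeps everything iff no two adjacent elements are equal.
lemma runs_norm (flag : List String) :
    (((PySem.List.enumerate flag).filter
        (fun p => p.1 == 0 || !(PySem.List.pyGet? flag (p.1 - 1) == some p.2))).length
      == flag.length) = adjOK flag := by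
  rw [Bool.eq_iff_iff, beq_iff_eq, adjOK, List.all_eq_true]
  rw [← PySem.List.length_enumerate flag 0, List.length_filter_eq_length_iff]
  have hc : ∀ j : Nat, ((0 : Int) + ((j+1 : Nat) : Int)) - 1 = ((j : Nat) : Int) := by
    intro j; push_cast; ring
  have hpj : ∀ (j : Nat) (hzl : j < (flag.zip (flag.drop 1)).length),
      (flag.zip (flag.drop 1))[j] =
        (flag[j]'(by simp [List.length_zip] at hzl; omega),
         flag[j+1]'(by simp [List.length_zip] at hzl; omega)) := by
    intro j hzl
    rw [List.getElem_zip]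
    refine Prod.ext rfl ?_
    simp only [List.getElem_drop]
    congr 1
    omega
  constructor
  · -- every enumerated pair passes the filter → adjacent pairs differ
    intro h p hp
    obtain ⟨j, hj, rfl⟩ := List.mem_iff_getElem.mp hp
    have hj1 : j + 1 < flag.length := by
      simp [List.length_zip] at hj; omega
    rw [hpj j hj]
    have hmem : ((0 : Int) + ((j+1 : Nat) : Int), flag[j+1]) ∈ PySem.List.enumerate flag 0 :=
      (PySem.List.mem_enumerate_iff flag 0 _).mpr ⟨j+1, hj1, rfl⟩
    have hpass := h _ hmem
    simp only [Bool.or_eq_true, beq_iff_eq, Bool.not_eq_true', beq_eq_false_iff_ne] at hpass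
    rcases hpass with h0 | hne
    · omega
    · rw [hc j, PySem.List.pyGet?_natCast] at hne
      rw [List.getElem?_eq_getElem (by omega : j < flag.length)] at hne
      simp only [ne_eq, Option.some.injEq] at hne
      simp [hne]
  · -- adjacent pairs differ → every enumerated pair passes the filter
    intro h p hp
    obtain ⟨k, hk, rfl⟩ := (PySem.List.mem_enumerate_iff flag 0 p).mp hp
    cases k with
    | zero => simp
    | succ j =>
      have hj1 : j + 1 < flag.length := hk
      have hzl : j < (flag.zip (flag.drop 1)).length := by
        simp [List.length_zip]; omega
      have := h _ (List.mem_iff_getElem.mpr ⟨j, hzl, rfl⟩)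
      rw [hpj j hzl] at this
      simp only [Bool.not_eq_true', beq_eq_false_iff_ne, ne_eq] at this
      simp only [Bool.or_eq_true, beq_iff_eq, Bool.not_eq_true', beq_eq_false_iff_ne]
      right
      rw [hc j, PySem.List.pyGet?_natCast]
      rw [List.getElem?_eq_getElem (by omega : j < flag.length)]
      simp only [ne_eq, Option.some.injEq]
      exact this

-- ===== VERDICT (by name: the statement is the Claim_ definition above) =====
theorem check_spec : Claim_equal_check := by
  intro flag _
  show check flag = check_alt flag
  rw [check_norm]
  simp only [check_alt, runs_norm, subset_norm, Bool.and_comm]
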